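-- pv_equiv track=rewrite | github.com/codelearner1990/pythonplatformapp | app.py | extract_failure_reason
-- ===== SOURCE A (Python) =====
-- def extract_failure_reason(stdout_content, failed_line):
--     """Extract a meaningful failure reason from the stdout content after a failed task."""
--     failure_reason_lines = []
--     capture = False
--     for line in stdout_content.splitlines():
--         if line == failed_line:
--             capture = True  # Start capturing failure reason lines after the failed task line
--         elif capture:
--             if line.startswith("TASK [") or line.startswith("ok:") or line.startswith("failed:"):
--                 break  # Stop capturing if a new task starts
--             failure_reason_lines.append(line.strip())  # Add failure reason lines
--
--     # Join the captured lines into a single failure reason message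
--     return " ".join(failure_reason_lines).strip() if failure_reason_lines else "Failed for unknown reason"
-- ===== SOURCE B (Python) =====
-- def extract_failure_reason(stdout_content, failed_line):
--     """Extract a meaningful failure reason from the stdout content after a failed task."""
--     # Group the output into task blocks: every line beginning a new task/result
--     # ("TASK [", "ok:", "failed:") opens a fresh block.
--     blocks = [[]]
--     for line in stdout_content.splitlines():
--         if line.startswith(("TASK [", "ok:", "failed:")):
--             blocks.append([])
--         blocks[-1].append(line)
--     # The reason is the remainder of the block that contains the failed line.
--     for block in blocks:
--         if failed_line in block:
--             rest = block[block.index(failed_line) + 1:]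
--             if rest:
--                 return " ".join(l.strip() for l in rest).strip()
--             break
--     return "Failed for unknown reason"
-- ===== Notes on version B (the rewrite author's own statement) =====
-- stated objective: alternative
-- what changed: B first groups the output into task blocks (each 'TASK ['/'ok:'/'failed:' line opens a block), then returns the remainder of the block containing the failed line; Pre_ excludes inputs where failed_line occurs more than once among the lines, on which A's capture-flag re-trigger silently skips the repeated occurrence - an accidental corner.
-- outside the precondition, e.g. on extract_failure_reason('f\nx\nf\ny', 'f'): A returns 'x y', B returns 'x f y'
import Mathlib
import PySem

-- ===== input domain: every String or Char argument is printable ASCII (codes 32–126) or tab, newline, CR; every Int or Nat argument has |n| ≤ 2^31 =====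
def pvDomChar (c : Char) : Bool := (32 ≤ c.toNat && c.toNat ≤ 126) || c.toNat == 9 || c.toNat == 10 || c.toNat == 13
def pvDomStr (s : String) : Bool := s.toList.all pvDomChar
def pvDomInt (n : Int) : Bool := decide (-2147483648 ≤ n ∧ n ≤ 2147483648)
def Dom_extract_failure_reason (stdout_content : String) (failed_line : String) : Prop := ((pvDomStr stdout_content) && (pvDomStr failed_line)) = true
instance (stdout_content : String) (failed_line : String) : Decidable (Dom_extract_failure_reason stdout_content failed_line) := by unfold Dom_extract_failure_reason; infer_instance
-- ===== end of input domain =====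

-- B groups the output into task blocks first and returns the remainder of the block
-- containing the failed line (objective: alternative); Pre_ excludes repeated
-- occurrences of failed_line, where A's capture-flag re-trigger is accidental.


-- ===== PORT A =====
-- the three "new task starts" prefixes, tested identically by both sources
def efrStop (line : String) : Bool :=
  PySem.Str.startswith line "TASK [" || PySem.Str.startswith line "ok:" || PySem.Str.startswith line "failed:"

-- A's for-loop over the lines, with the capture flag and the accumulated failure_reason_lines
def efrLoop (failed_line : String) : List String → Bool → List String → List String
  | [], _, acc => acc
  | line :: rest, capture, acc =>
    if line == failed_line then efrLoop failed_line rest true acc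
    else if capture then
      if efrStop line then acc
      else efrLoop failed_line rest capture (acc ++ [PySem.Str.strip line])
    else efrLoop failed_line rest capture acc

def extract_failure_reason (stdout_content : String) (failed_line : String) : String :=
  let frl := efrLoop failed_line (PySem.Str.splitlines stdout_content) false []
  if frl.isEmpty then "Failed for unknown reason"
  else PySem.Str.strip (PySem.Str.join " " frl)

-- ===== PORT B =====
-- B's grouping loop: blocks[-1].append, a new block opened at every stop line
-- (the list-of-blocks is kept as completed blocks ++ [current block])
def efrBlocks : List String → List (List String) → List String → List (List String)
  | [], done, cur => done ++ [cur]
  | line :: rest, done, cur =>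
    if efrStop line then efrBlocks rest (done ++ [cur]) [line]
    else efrBlocks rest done (cur ++ [line])

-- B's second loop: find the block containing failed_line, return the rest of it
def efrFind (failed_line : String) : List (List String) → String
  | [] => "Failed for unknown reason"
  | block :: bs =>
    if failed_line ∈ block then
      match PySem.List.index? block failed_line with
      | some i =>
        let rest := block.drop (i + 1)
        if rest.isEmpty then "Failed for unknown reason"
        else PySem.Str.strip (PySem.Str.join " " (rest.map PySem.Str.strip))
      | none => "Failed for unknown reason"
    else efrFind failed_line bs

def extract_failure_reason_alt (stdout_content : String) (failed_line : String) : String :=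
  efrFind failed_line (efrBlocks (PySem.Str.splitlines stdout_content) [] [])

-- ===== PRECONDITION & SPEC =====
-- Pre_ excludes inputs where failed_line occurs more than once among the lines: there
-- A's capture flag re-triggers and silently skips the repeated occurrence, an accident
-- of its implementation, while B's block decomposition treats the repeat as an ordinary line.
def Pre_extract_failure_reason (stdout_content : String) (failed_line : String) : Prop :=
  (PySem.Str.splitlines stdout_content).count failed_line ≤ 1
instance (stdout_content : String) (failed_line : String) : Decidable (Pre_extract_failure_reason stdout_content failed_line) := by unfold Pre_extract_failure_reason; infer_instance

def pvWitness_extract_failure_reason : String × String :=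
  ("TASK [ping]\nfailed: [host]\ntimeout\n  no route ", "failed: [host]")

def Spec_extract_failure_reason (stdout_content : String) (failed_line : String) (out : String) : Prop := out = extract_failure_reason_alt stdout_content failed_line
instance (stdout_content : String) (failed_line : String) (out : String) : Decidable (Spec_extract_failure_reason stdout_content failed_line out) := by unfold Spec_extract_failure_reason; infer_instance

-- ===== CLAIM (what is proved, stated in full; the proofs are below) =====
def Claim_equal_extract_failure_reason : Prop := ∀ (stdout_content : String) (failed_line : String), Dom_extract_failure_reason stdout_content failed_line → Pre_extract_failure_reason stdout_content failed_line → Spec_extract_failure_reason stdout_content failed_line (extract_failure_reason stdout_content failed_line)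

-- ===== LEMMAS AND PROOFS =====

-- the common final formatting of a captured region
def efrOut (r : List String) : String :=
  if r.isEmpty then "Failed for unknown reason"
  else PySem.Str.strip (PySem.Str.join " " (r.map PySem.Str.strip))

-- ---- A-side characterisation ----

-- once capture is on and failed_line no longer occurs, A collects the takeWhile-region
lemma efrLoop_true (fl : String) (ls : List String) (acc : List String)
    (h : fl ∉ ls) :
    efrLoop fl ls true acc
      = acc ++ (ls.takeWhile (fun l => !efrStop l)).map PySem.Str.strip := by
  induction ls generalizing acc with
  | nil => simp [efrLoop]
  | cons l rest ih =>
    have hl : l ≠ fl := fun e => h (e ▸ List.mem_cons_self)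
    have hr : fl ∉ rest := fun e => h (List.mem_cons_of_mem _ e)
    by_cases hs : efrStop l = true
    · simp [efrLoop, hl, hs, List.takeWhile]
    · simp [efrLoop, hl, hs, ih _ hr, List.takeWhile]

-- before capture, A scans to the first occurrence of failed_line
lemma efrLoop_false (fl : String) (ls : List String) (acc : List String) :
    efrLoop fl ls false acc
      = match PySem.List.index? ls fl with
        | none => acc
        | some i => efrLoop fl (ls.drop (i + 1)) true acc := by
  induction ls with
  | nil => simp [efrLoop, PySem.List.index?_eq_idxOf?]
  | cons l rest ih =>
    by_cases h : l = fl
    · subst h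
      rw [PySem.List.index?_cons_self]
      simp [efrLoop]
    · rw [PySem.List.index?_cons_of_ne rest h]
      have hb : (l == fl) = false := by simpa using h
      simp only [efrLoop, hb, Bool.false_eq_true, ite_false]
      rw [ih]
      cases hidx : PySem.List.index? rest fl with
      | none => simp
      | some i => simp

-- under Pre_, the first occurrence has no repeat in the tail
lemma not_mem_drop_of_index? (fl : String) (ls : List String) (i : Nat)
    (hidx : PySem.List.index? ls fl = some i) (hc : ls.count fl ≤ 1) :
    fl ∉ ls.drop (i + 1) := by
  obtain ⟨pre, suf, hls, hlen, -⟩ := (PySem.List.index?_eq_some_iff ls fl i).mp hidx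
  have hdrop : ls.drop (i + 1) = suf := by
    subst hls hlen
    rw [show pre ++ fl :: suf = (pre ++ [fl]) ++ suf by simp,
        List.drop_append_of_le_length (by simp)]
    simp
  rw [hdrop]
  intro hm
  have h1 := List.one_le_count_iff.mpr hm
  have h2 : List.count fl ls = List.count fl pre + List.count fl (fl :: suf) := by
    rw [hls, List.count_append]
  simp at h2
  omega

-- A's result, under Pre_: locate, then format the takeWhile-region of the tail
lemma extract_A_char (fl : String) (ls : List String) (hc : ls.count fl ≤ 1) :
    (let frl := efrLoop fl ls false [];
     if frl.isEmpty then "Failed for unknown reason"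
     else PySem.Str.strip (PySem.Str.join " " frl))
      = match PySem.List.index? ls fl with
        | none => "Failed for unknown reason"
        | some i => efrOut ((ls.drop (i + 1)).takeWhile (fun l => !efrStop l)) := by
  rw [efrLoop_false]
  cases hidx : PySem.List.index? ls fl with
  | none => rfl
  | some i =>
    dsimp only
    have hnot := not_mem_drop_of_index? fl ls i hidx hc
    rw [efrLoop_true fl _ _ hnot]
    simp only [List.nil_append, efrOut, List.isEmpty_map]

-- ---- B-side characterisation ----

-- completed blocks pass straight through the grouping loop
lemma efrBlocks_append (ls : List String) (done : List (List String)) (cur : List String) :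
    efrBlocks ls done cur = done ++ efrBlocks ls [] cur := by
  induction ls generalizing done cur with
  | nil => simp [efrBlocks]
  | cons l rest ih =>
    by_cases hs : efrStop l = true
    · simp only [efrBlocks, hs, if_true, List.nil_append]
      rw [ih (done ++ [cur]), ih [cur]]
      simp
    · simp only [efrBlocks, hs, Bool.false_eq_true, ite_false]
      exact ih done (cur ++ [l])

-- the search result when failed_line already sits in the current block
lemma efrFind_blocks_found (fl : String) (ls : List String) (cur : List String)
    (j : Nat) (hj : PySem.List.index? cur fl = some j) (hnl : fl ∉ ls) :
    efrFind fl (efrBlocks ls [] cur)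
      = efrOut (cur.drop (j + 1) ++ ls.takeWhile (fun l => !efrStop l)) := by
  induction ls generalizing cur j with
  | nil =>
    have hm : fl ∈ cur := (PySem.List.index?_isSome_iff cur fl).mp (by rw [hj]; rfl)
    rw [PySem.List.index?_eq_idxOf?] at hj
    simp [efrBlocks, efrFind, hm, PySem.List.index?_eq_idxOf?, hj, efrOut]
  | cons l rest ih =>
    have hl : l ≠ fl := fun e => hnl (e ▸ List.mem_cons_self)
    have hr : fl ∉ rest := fun e => hnl (List.mem_cons_of_mem _ e)
    have hm : fl ∈ cur := (PySem.List.index?_isSome_iff cur fl).mp (by rw [hj]; rfl)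
    by_cases hs : efrStop l = true
    · simp only [efrBlocks, hs, if_true]
      rw [efrBlocks_append]
      simp only [List.cons_append, List.nil_append, efrFind, hm, if_true, hj]
      simp [List.takeWhile, hs, efrOut]
    · simp only [efrBlocks, hs, Bool.false_eq_true, ite_false]
      have hj' : PySem.List.index? (cur ++ [l]) fl = some j := by
        rw [PySem.List.index?_append_of_mem [l] hm, hj]
      rw [ih (cur ++ [l]) j hj' hr]
      have hjlt : j < cur.length := by
        obtain ⟨hk, -, -⟩ := PySem.List.getElem_of_index?_eq_some hj
        exact hk
      have hd : (cur ++ [l]).drop (j + 1) = cur.drop (j + 1) ++ [l] := by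
        rw [List.drop_append_of_le_length (by omega)]
      rw [hd]
      simp [List.takeWhile, hs]

-- the search result when failed_line is not yet in the current block
lemma efrFind_blocks (fl : String) (ls : List String) (cur : List String)
    (hnc : fl ∉ cur) (hc : ls.count fl ≤ 1) :
    efrFind fl (efrBlocks ls [] cur)
      = match PySem.List.index? ls fl with
        | none => "Failed for unknown reason"
        | some i => efrOut ((ls.drop (i + 1)).takeWhile (fun l => !efrStop l)) := by
  induction ls generalizing cur with
  | nil =>
    simp [efrBlocks, efrFind, hnc, PySem.List.index?_eq_idxOf?]
  | cons l rest ih =>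
    have hcount : rest.count fl ≤ 1 :=
      le_trans ((List.sublist_cons_self l rest).count_le fl) hc
    by_cases h : l = fl
    · subst h
      have hrest : l ∉ rest := by
        intro hm
        have h1 := List.one_le_count_iff.mpr hm
        have h2 : List.count l (l :: rest) = List.count l rest + 1 := by simp
        omega
      rw [PySem.List.index?_cons_self]
      dsimp only
      by_cases hs : efrStop l = true
      · simp only [efrBlocks, hs, if_true]
        rw [efrBlocks_append]
        simp only [List.cons_append, List.nil_append, efrFind, hnc, if_false]
        rw [efrFind_blocks_found l rest [l] 0 (PySem.List.index?_cons_self l []) hrest]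
        simp
      · simp only [efrBlocks, hs, Bool.false_eq_true, ite_false]
        have hj : PySem.List.index? (cur ++ [l]) l = some cur.length :=
          PySem.List.index?_append_singleton_self cur l hnc
        rw [efrFind_blocks_found l rest (cur ++ [l]) cur.length hj hrest]
        have hdrop : (cur ++ [l]).drop (cur.length + 1) = [] := by
          apply List.drop_eq_nil_of_le; simp
        rw [hdrop]
        simp
    · rw [PySem.List.index?_cons_of_ne rest h]
      by_cases hs : efrStop l = true
      · simp only [efrBlocks, hs, if_true]
        rw [efrBlocks_append]
        simp only [List.cons_append, List.nil_append, efrFind, hnc, if_false]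
        rw [ih [l] (by simp [Ne.symm h]) hcount]
        cases hidx : PySem.List.index? rest fl with
        | none => simp
        | some i => simp
      · simp only [efrBlocks, hs, Bool.false_eq_true, ite_false]
        have hnc' : fl ∉ cur ++ [l] := by
          simp [hnc, Ne.symm h]
        rw [ih (cur ++ [l]) hnc' hcount]
        cases hidx : PySem.List.index? rest fl with
        | none => simp
        | some i => simp

-- ===== VERDICT (by name: the statement is the Claim_ definition above) =====
theorem extract_failure_reason_spec : Claim_equal_extract_failure_reason := by
  intro stdout_content failed_line _ hpre
  unfold Spec_extract_failure_reason extract_failure_reason extract_failure_reason_alt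
  rw [extract_A_char failed_line _ hpre]
  rw [efrFind_blocks failed_line _ [] (by simp) hpre]
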